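-- pv_equiv track=rewrite | github.com/hack-ink/vibe-style | scripts/rust-style-check.py | strip_turbofish
-- ===== SOURCE A (Python) =====
-- def strip_turbofish(text: str) -> str:
--     out: list[str] = []
--     i = 0
--
--     while i < len(text):
--         if text.startswith("::<", i):
--             i += 3
--             depth = 1
--             while i < len(text) and depth > 0:
--                 ch = text[i]
--                 if ch == "<":
--                     depth += 1
--                 elif ch == ">":
--                     depth -= 1
--                 i += 1
--             continue
--         out.append(text[i])
--         i += 1
--
--     return "".join(out)
-- ===== SOURCE B (Python) =====
-- def strip_turbofish(text: str) -> str: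
--     out: list[str] = []
--     i = 0
--     while True:
--         j = text.find("::<", i)
--         if j == -1:
--             out.append(text[i:])
--             break
--         out.append(text[i:j])
--         depth = 1
--         for off, ch in enumerate(text[j + 3:]):
--             depth += (ch == "<") - (ch == ">")
--             if depth == 0:
--                 i = j + 4 + off
--                 break
--         else:
--             i = len(text)
--     return "".join(out)
-- ===== Notes on version B (the rewrite author's own statement) =====
-- stated objective: faster
-- what changed: B replaces A's one-character-at-a-time outer scan and per-char list append with str.find-driven chunking that appends whole slices between turbofish segments, and replaces the if/elif depth while-loop with a for/enumerate over the tail slice using an arithmetic depth update and for-else for the unbalanced case.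
import Mathlib
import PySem

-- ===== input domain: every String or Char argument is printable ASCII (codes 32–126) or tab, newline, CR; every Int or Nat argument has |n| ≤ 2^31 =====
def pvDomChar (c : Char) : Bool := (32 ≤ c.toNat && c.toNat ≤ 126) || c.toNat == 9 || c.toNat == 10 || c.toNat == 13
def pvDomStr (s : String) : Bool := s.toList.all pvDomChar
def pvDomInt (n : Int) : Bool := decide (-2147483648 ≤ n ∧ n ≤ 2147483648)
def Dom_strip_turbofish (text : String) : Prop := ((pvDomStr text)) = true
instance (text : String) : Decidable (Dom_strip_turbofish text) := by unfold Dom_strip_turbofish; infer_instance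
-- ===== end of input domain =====

-- B replaces the character-at-a-time scan by str.find-driven chunk copying with an
-- arithmetic depth counter over the tail slice (measured faster by a constant factor).

-- ===== PORT A =====
-- inner 'while i < len(text) and depth > 0' loop of A: consumes chars updating depth
def skipA : List Char → Int → List Char
  | [], _ => []
  | c :: rest, depth =>
    if depth ≤ 0 then c :: rest
    else skipA rest (if c = '<' then depth + 1 else if c = '>' then depth - 1 else depth)

theorem skipA_length_le (cs : List Char) (d : Int) : (skipA cs d).length ≤ cs.length := by
  induction cs generalizing d with
  | nil => simp [skipA]
  | cons c rest ih =>
    simp only [skipA]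
    split
    · simp
    · exact Nat.le_succ_of_le (ih _)

-- outer while loop of A: the suffix at index i is the list argument;
-- text.startswith("::<", i) is the first pattern
def loopA : List Char → List Char
  | ':' :: ':' :: '<' :: rest => loopA (skipA rest 1)
  | c :: rest => c :: loopA rest
  | [] => []
termination_by cs => cs.length
decreasing_by
  · exact Nat.lt_succ_of_le (Nat.le_succ_of_le (Nat.le_succ_of_le (skipA_length_le rest 1)))
  all_goals simp

def strip_turbofish (text : String) : String := String.ofList (loopA text.toList)

-- ===== PORT B =====
-- text.find("::<", i): returns the chunk text[i:j] before the match and the tail text[j+3:]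
def findTF : List Char → Option (List Char × List Char)
  | ':' :: ':' :: '<' :: rest => some ([], rest)
  | c :: rest => (findTF rest).map (fun pr => (c :: pr.1, pr.2))
  | [] => none

theorem findTF_length_lt (cs : List Char) : ∀ p r, findTF cs = some (p, r) → r.length < cs.length := by
  fun_induction findTF cs with
  | case1 rest =>
    intro p r h
    simp only [Option.some.injEq, Prod.mk.injEq] at h
    simp [← h.2]
    omega
  | case2 c rest hne ih =>
    intro p r h
    simp only [Option.map_eq_some_iff] at h
    obtain ⟨⟨p', r'⟩, hpr, heq⟩ := h
    have := ih p' r' hpr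
    simp only [Prod.mk.injEq] at heq
    simp [← heq.2]
    omega
  | case3 => intro p r h; simp at h

-- for/enumerate over text[j+3:] with the arithmetic depth update: offset of the closing '>'
def closeOff : List Char → Int → Option Nat
  | [], _ => none
  | c :: rest, depth =>
    let d := depth + (if c = '<' then (1 : Int) else 0) - (if c = '>' then 1 else 0)
    if d = 0 then some 0 else (closeOff rest d).map (· + 1)

def loopB : List Char → List Char
  | cs =>
    match h : findTF cs with
    | none => cs
    | some (p, r) =>
      p ++ loopB (match closeOff r 1 with
                  | some off => r.drop (off + 1)
                  | none => [])
termination_by cs => cs.length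
decreasing_by
  have hlt := findTF_length_lt cs p r h
  split
  · exact Nat.lt_of_le_of_lt ((List.length_drop).le.trans (Nat.sub_le _ _)) hlt
  · exact Nat.lt_of_le_of_lt (Nat.zero_le _) hlt

def strip_turbofish_alt (text : String) : String := String.ofList (loopB text.toList)

-- ===== PRECONDITION & SPEC =====
def Spec_strip_turbofish (text : String) (out : String) : Prop := out = strip_turbofish_alt text
instance (text : String) (out : String) : Decidable (Spec_strip_turbofish text out) := by unfold Spec_strip_turbofish; infer_instance

-- ===== CLAIM (what is proved, stated in full; the proofs are below) =====
def Claim_equal_strip_turbofish : Prop := ∀ (text : String), Dom_strip_turbofish text → Spec_strip_turbofish text (strip_turbofish text)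

-- ===== LEMMAS AND PROOFS =====

theorem skipA_nonpos (cs : List Char) (d : Int) (h : d ≤ 0) : skipA cs d = cs := by
  cases cs <;> simp [skipA, h]

-- the per-char depth loop of A lands exactly past B's computed closing offset
theorem skip_close (cs : List Char) : ∀ d : Int, 1 ≤ d →
    skipA cs d = (match closeOff cs d with
                  | some off => cs.drop (off + 1)
                  | none => ([] : List Char)) := by
  induction cs with
  | nil => intro d _; simp [skipA, closeOff]
  | cons c rest ih =>
    intro d hd
    have hd0 : ¬ d ≤ 0 := by omega
    have hup : (if c = '<' then d + 1 else if c = '>' then d - 1 else d)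
        = d + (if c = '<' then (1 : Int) else 0) - (if c = '>' then 1 else 0) := by
      by_cases h1 : c = '<' <;> by_cases h2 : c = '>' <;> simp_all
    simp only [skipA, closeOff, if_neg hd0, hup]
    by_cases hz : d + (if c = '<' then (1 : Int) else 0) - (if c = '>' then 1 else 0) = 0
    · rw [hz, if_pos rfl, skipA_nonpos rest 0 (le_refl 0)]
      simp
    · have hge : 1 ≤ d + (if c = '<' then (1 : Int) else 0) - (if c = '>' then 1 else 0) := by
        by_cases h1 : c = '<' <;> by_cases h2 : c = '>' <;> simp_all <;> omega
      rw [if_neg hz, ih _ hge]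
      cases hco : closeOff rest (d + (if c = '<' then (1 : Int) else 0) - (if c = '>' then 1 else 0)) with
      | none => simp
      | some k => simp

theorem findTF_cons (c : Char) (rest : List Char)
    (h : ¬ (c = ':' ∧ ∃ r, rest = ':' :: '<' :: r)) :
    findTF (c :: rest) = (findTF rest).map (fun pr => (c :: pr.1, pr.2)) := by
  rw [findTF.eq_def]
  split
  · rename_i r heq
    injection heq with h1 h2
    exact absurd ⟨h1, r, h2⟩ h
  · rename_i c' rest' heq
    injection heq with h1 h2
    rw [h1, h2]
  · rename_i heq
    simp at heq

-- chunk copying agrees with per-char copying on a non-turbofish head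
theorem loopB_cons (c : Char) (rest : List Char)
    (h : ¬ (c = ':' ∧ ∃ r, rest = ':' :: '<' :: r)) :
    loopB (c :: rest) = c :: loopB rest := by
  rw [loopB, loopB, findTF_cons c rest h]
  cases hf : findTF rest with
  | none => simp
  | some pr => cases pr with | mk p r => simp

theorem loopA_eq_loopB (cs : List Char) : loopA cs = loopB cs := by
  fun_induction loopA cs with
  | case1 rest ih =>
    have hf : findTF (':' :: ':' :: '<' :: rest) = some ([], rest) := rfl
    rw [loopB]
    split
    · rename_i heq
      rw [hf] at heq
      cases heq
    · rename_i p r heq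
      rw [hf] at heq
      injection heq with heq
      injection heq with hp hr
      rw [← hp, ← hr, List.nil_append, ← skip_close rest 1 (le_refl 1)]
      exact ih
  | case2 c rest hne ih =>
    rw [loopB_cons c rest ?_, ih]
    rintro ⟨rfl, r, rfl⟩
    exact hne r rfl rfl
  | case3 => rw [loopB]; rfl

-- ===== VERDICT (by name: the statement is the Claim_ definition above) =====
theorem strip_turbofish_spec : Claim_equal_strip_turbofish := by
  intro text _
  unfold Spec_strip_turbofish strip_turbofish strip_turbofish_alt
  exact congrArg String.ofList (loopA_eq_loopB _)
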